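-- pv_equiv track=rewrite | github.com/justQrius/Ai_opportunity_browser | data-ingestion/plugins/github_plugin.py | _classify_signal_type
-- ===== SOURCE A (Python) =====
-- from typing import Dict, List, Optional, Any, AsyncIterator
--
-- def _classify_signal_type(content: str, labels: List[Dict[str, Any]]) -> str:
--     """Classify the type of market signal based on content and labels."""
--     content_lower = content.lower()
--     label_names = [label.get("name", "").lower() for label in labels]
--
--     # Check labels first (more reliable)
--     if any(label in ["bug", "error", "issue"] for label in label_names):
--         return "complaint"
--     elif any(label in ["enhancement", "feature", "feature-request"] for label in label_names):
--         return "feature_request"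
--     elif any(label in ["question", "help", "discussion"] for label in label_names):
--         return "discussion"
--
--     # Analyze content
--     if any(word in content_lower for word in ["bug", "error", "broken", "doesn't work"]):
--         return "complaint"
--     elif any(word in content_lower for word in ["feature", "enhancement", "improve", "add"]):
--         return "feature_request"
--     elif any(word in content_lower for word in ["pain", "frustrating", "difficult", "problem"]):
--         return "pain_point"
--     elif any(word in content_lower for word in ["opportunity", "market", "business"]):
--         return "opportunity"
--     else:
--         return "discussion"
-- ===== SOURCE B (Python) =====
-- # Priority-minimisation reformulation: instead of checking rule groups in order,
-- # every keyword is mapped once to a numeric priority (labels 0-2, content 3-6),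
-- # a single pass over the data keeps the minimum priority seen, and the answer
-- # is read off a result table indexed by that minimum.
--
-- _LABEL_PRI = {
--     "bug": 0, "error": 0, "issue": 0,
--     "enhancement": 1, "feature": 1, "feature-request": 1,
--     "question": 2, "help": 2, "discussion": 2,
-- }
--
-- _CONTENT_PRI = {
--     "bug": 3, "error": 3, "broken": 3, "doesn't work": 3,
--     "feature": 4, "enhancement": 4, "improve": 4, "add": 4,
--     "pain": 5, "frustrating": 5, "difficult": 5, "problem": 5,
--     "opportunity": 6, "market": 6, "business": 6,
-- }
--
-- _RESULTS = ["complaint", "feature_request", "discussion",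
--             "complaint", "feature_request", "pain_point", "opportunity",
--             "discussion"]
--
-- def _classify_signal_type(content, labels):
--     """Classify the type of market signal based on content and labels."""
--     best = 7
--     for label in labels:
--         best = min(best, _LABEL_PRI.get(label.get("name", "").lower(), 7))
--     if best == 7:
--         content_lower = content.lower()
--         for word, pri in _CONTENT_PRI.items():
--             if word in content_lower:
--                 best = min(best, pri)
--     return _RESULTS[best]
-- ===== Notes on version B (the rewrite author's own statement) =====
-- stated objective: alternative
-- what changed: Replaces the ordered if/elif rule-group cascade by priority minimisation: every keyword is mapped to a numeric priority in a single dict, one pass over the labels (and, if none match, one pass over the content keywords) keeps the minimum priority seen, and the result is read from a table indexed by that minimum.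
import Mathlib
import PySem

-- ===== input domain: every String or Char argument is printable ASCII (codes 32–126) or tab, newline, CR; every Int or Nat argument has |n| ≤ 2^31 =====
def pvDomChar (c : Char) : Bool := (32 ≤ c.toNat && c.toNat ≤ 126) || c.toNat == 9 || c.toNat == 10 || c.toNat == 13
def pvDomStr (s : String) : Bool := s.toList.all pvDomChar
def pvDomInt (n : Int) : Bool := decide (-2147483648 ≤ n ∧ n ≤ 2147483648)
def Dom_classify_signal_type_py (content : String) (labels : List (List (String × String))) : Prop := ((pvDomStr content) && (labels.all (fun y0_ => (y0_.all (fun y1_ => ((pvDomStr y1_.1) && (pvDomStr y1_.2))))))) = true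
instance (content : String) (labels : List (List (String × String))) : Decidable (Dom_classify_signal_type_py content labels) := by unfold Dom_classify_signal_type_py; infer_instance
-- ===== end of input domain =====

-- B replaces A's ordered if/elif rule-group cascade by priority minimisation: each
-- keyword is mapped to a numeric priority, a single min-accumulator pass over the
-- data finds the best priority, and the result is read off a table (alternative).

-- label.get("name", "") : first-match association-list lookup (dict convention)
def pvGetName (label : List (String × String)) : String :=
  (((label.find? (fun p => p.1 == "name")).map Prod.snd).getD "")

-- ===== PORT A =====
def classify_signal_type_py (content : String) (labels : List (List (String × String))) : String :=
  let content_lower := PySem.Str.lower content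
  let label_names := labels.map (fun label => PySem.Str.lower (pvGetName label))
  if label_names.any (fun label => (["bug", "error", "issue"] : List String).contains label) then
    "complaint"
  else if label_names.any (fun label => (["enhancement", "feature", "feature-request"] : List String).contains label) then
    "feature_request"
  else if label_names.any (fun label => (["question", "help", "discussion"] : List String).contains label) then
    "discussion"
  else if (["bug", "error", "broken", "doesn't work"] : List String).any (fun word => PySem.Str.isIn word content_lower) then
    "complaint"
  else if (["feature", "enhancement", "improve", "add"] : List String).any (fun word => PySem.Str.isIn word content_lower) then
    "feature_request"
  else if (["pain", "frustrating", "difficult", "problem"] : List String).any (fun word => PySem.Str.isIn word content_lower) then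
    "pain_point"
  else if (["opportunity", "market", "business"] : List String).any (fun word => PySem.Str.isIn word content_lower) then
    "opportunity"
  else
    "discussion"

-- ===== PORT B =====
def pvLabelPri : PySem.Dict String Nat :=
  PySem.Dict.mk [("bug", 0), ("error", 0), ("issue", 0),
                 ("enhancement", 1), ("feature", 1), ("feature-request", 1),
                 ("question", 2), ("help", 2), ("discussion", 2)]

def pvContentPri : PySem.Dict String Nat :=
  PySem.Dict.mk [("bug", 3), ("error", 3), ("broken", 3), ("doesn't work", 3),
                 ("feature", 4), ("enhancement", 4), ("improve", 4), ("add", 4),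
                 ("pain", 5), ("frustrating", 5), ("difficult", 5), ("problem", 5),
                 ("opportunity", 6), ("market", 6), ("business", 6)]

def pvResults : List String :=
  ["complaint", "feature_request", "discussion",
   "complaint", "feature_request", "pain_point", "opportunity",
   "discussion"]

def classify_signal_type_py_alt (content : String) (labels : List (List (String × String))) : String :=
  let best := labels.foldl (fun best label => min best (pvLabelPri.getD (PySem.Str.lower (pvGetName label)) 7)) 7
  let best :=
    if best == 7 then
      let content_lower := PySem.Str.lower content
      pvContentPri.items.foldl (fun b wp => if PySem.Str.isIn wp.1 content_lower then min b wp.2 else b) best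
    else best
  pvResults.getD best "discussion"

-- ===== PRECONDITION & SPEC =====
def Spec_classify_signal_type_py (content : String) (labels : List (List (String × String))) (out : String) : Prop := out = classify_signal_type_py_alt content labels
instance (content : String) (labels : List (List (String × String))) (out : String) : Decidable (Spec_classify_signal_type_py content labels out) := by unfold Spec_classify_signal_type_py; infer_instance

-- ===== CLAIM (what is proved, stated in full; the proofs are below) =====
def Claim_equal_classify_signal_type_py : Prop := ∀ (content : String) (labels : List (List (String × String))), Dom_classify_signal_type_py content labels → Spec_classify_signal_type_py content labels (classify_signal_type_py content labels)

-- ===== LEMMAS AND PROOFS =====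

-- the priority dict, characterised pointwise by the three keyword groups
theorem pri_char (n : String) :
    pvLabelPri.getD n 7
      = if (["bug", "error", "issue"] : List String).contains n then 0
        else if (["enhancement", "feature", "feature-request"] : List String).contains n then 1
        else if (["question", "help", "discussion"] : List String).contains n then 2
        else 7 := by
  by_cases h : n ∈ (["bug", "error", "issue", "enhancement", "feature", "feature-request",
      "question", "help", "discussion"] : List String)
  · simp only [List.mem_cons, List.not_mem_nil, or_false] at h
    rcases h with rfl | rfl | rfl | rfl | rfl | rfl | rfl | rfl | rfl <;> rfl
  · simp only [List.mem_cons, List.not_mem_nil, or_false, not_or] at h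
    obtain ⟨h1, h2, h3, h4, h5, h6, h7, h8, h9⟩ := h
    simp [pvLabelPri, PySem.Dict.getD, PySem.Dict.get?,
      h1, h2, h3, h4, h5, h6, h7, h8, h9,
      Ne.symm h1, Ne.symm h2, Ne.symm h3, Ne.symm h4, Ne.symm h5, Ne.symm h6,
      Ne.symm h7, Ne.symm h8, Ne.symm h9]

-- min-accumulator over names = first keyword group hit (A's label cascade)
theorem fold_pri (l : List String) (a : Nat) (ha : a ≤ 7) :
    l.foldl (fun b n => min b (pvLabelPri.getD n 7)) a
      = min a (if l.any (fun n => (["bug", "error", "issue"] : List String).contains n) then 0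
          else if l.any (fun n => (["enhancement", "feature", "feature-request"] : List String).contains n) then 1
          else if l.any (fun n => (["question", "help", "discussion"] : List String).contains n) then 2
          else 7) := by
  induction l generalizing a with
  | nil => simp; omega
  | cons n l ih =>
    simp only [List.foldl_cons, List.any_cons]
    rw [ih _ (le_trans (Nat.min_le_left _ _) ha), pri_char n]
    rcases Bool.eq_false_or_eq_true ((["bug", "error", "issue"] : List String).contains n) with h0 | h0 <;>
    rcases Bool.eq_false_or_eq_true ((["enhancement", "feature", "feature-request"] : List String).contains n) with h1 | h1 <;>
    rcases Bool.eq_false_or_eq_true ((["question", "help", "discussion"] : List String).contains n) with h2 | h2 <;>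
    rcases Bool.eq_false_or_eq_true (l.any (fun n => (["bug", "error", "issue"] : List String).contains n)) with g0 | g0 <;>
    rcases Bool.eq_false_or_eq_true (l.any (fun n => (["enhancement", "feature", "feature-request"] : List String).contains n)) with g1 | g1 <;>
    rcases Bool.eq_false_or_eq_true (l.any (fun n => (["question", "help", "discussion"] : List String).contains n)) with g2 | g2 <;>
      simp only [h0, h1, h2, g0, g1, g2, Bool.false_or, Bool.true_or, Bool.or_self,
        if_true, if_false, Bool.false_eq_true] <;> omega

-- one constant-priority keyword group folded with the min accumulator
theorem fold_group (cl : String) (words : List String) (p a : Nat) :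
    (words.map (fun w => (w, p))).foldl
        (fun b wp => if PySem.Str.isIn wp.1 cl then min b wp.2 else b) a
      = if words.any (fun w => PySem.Str.isIn w cl) then min a p else a := by
  induction words generalizing a with
  | nil => simp
  | cons w ws ih =>
    simp only [List.map_cons, List.foldl_cons, List.any_cons]
    rcases Bool.eq_false_or_eq_true (PySem.Str.isIn w cl) with h | h <;>
      rcases Bool.eq_false_or_eq_true (ws.any (fun w => PySem.Str.isIn w cl)) with hw | hw <;>
        simp only [h, hw, ih, Bool.false_or, Bool.true_or, if_true, if_false, Bool.false_eq_true] <;>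
          omega

-- the content pass: minimum over keyword priorities = first matching group
theorem content_fold (cl : String) :
    pvContentPri.items.foldl (fun b wp => if PySem.Str.isIn wp.1 cl then min b wp.2 else b) 7
      = if (["bug", "error", "broken", "doesn't work"] : List String).any (fun w => PySem.Str.isIn w cl) then 3
        else if (["feature", "enhancement", "improve", "add"] : List String).any (fun w => PySem.Str.isIn w cl) then 4
        else if (["pain", "frustrating", "difficult", "problem"] : List String).any (fun w => PySem.Str.isIn w cl) then 5
        else if (["opportunity", "market", "business"] : List String).any (fun w => PySem.Str.isIn w cl) then 6
        else 7 := by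
  have hitems : pvContentPri.items
      = ((["bug", "error", "broken", "doesn't work"] : List String).map (fun w => (w, 3)))
        ++ ((["feature", "enhancement", "improve", "add"] : List String).map (fun w => (w, 4)))
        ++ ((["pain", "frustrating", "difficult", "problem"] : List String).map (fun w => (w, 5)))
        ++ ((["opportunity", "market", "business"] : List String).map (fun w => (w, 6))) := rfl
  rw [hitems, List.foldl_append, List.foldl_append, List.foldl_append,
    fold_group, fold_group, fold_group, fold_group]
  rcases Bool.eq_false_or_eq_true ((["bug", "error", "broken", "doesn't work"] : List String).any (fun w => PySem.Str.isIn w cl)) with hc0 | hc0 <;>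
    rcases Bool.eq_false_or_eq_true ((["feature", "enhancement", "improve", "add"] : List String).any (fun w => PySem.Str.isIn w cl)) with hc1 | hc1 <;>
      rcases Bool.eq_false_or_eq_true ((["pain", "frustrating", "difficult", "problem"] : List String).any (fun w => PySem.Str.isIn w cl)) with hc2 | hc2 <;>
        rcases Bool.eq_false_or_eq_true ((["opportunity", "market", "business"] : List String).any (fun w => PySem.Str.isIn w cl)) with hc3 | hc3 <;>
          simp only [hc0, hc1, hc2, hc3, if_true, if_false, Bool.false_eq_true] <;> omega

-- ===== VERDICT (by name: the statement is the Claim_ definition above) =====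
theorem classify_signal_type_py_spec : Claim_equal_classify_signal_type_py := by
  intro content labels _
  unfold Spec_classify_signal_type_py
  simp only [classify_signal_type_py, classify_signal_type_py_alt]
  have hmap : labels.foldl
        (fun best label => min best (pvLabelPri.getD (PySem.Str.lower (pvGetName label)) 7)) 7
      = (labels.map (fun label => PySem.Str.lower (pvGetName label))).foldl
          (fun b n => min b (pvLabelPri.getD n 7)) 7 := by rw [List.foldl_map]
  rw [hmap, fold_pri _ 7 le_rfl]
  rcases Bool.eq_false_or_eq_true ((labels.map (fun label => PySem.Str.lower (pvGetName label))).any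
      (fun n => (["bug", "error", "issue"] : List String).contains n)) with hb0 | hb0 <;>
    rcases Bool.eq_false_or_eq_true ((labels.map (fun label => PySem.Str.lower (pvGetName label))).any
        (fun n => (["enhancement", "feature", "feature-request"] : List String).contains n)) with hb1 | hb1 <;>
      rcases Bool.eq_false_or_eq_true ((labels.map (fun label => PySem.Str.lower (pvGetName label))).any
          (fun n => (["question", "help", "discussion"] : List String).contains n)) with hb2 | hb2 <;>
        simp only [hb0, hb1, hb2] <;> try rfl
  -- remaining case: no label group matched; the content pass decides
  simp only [Bool.false_eq_true, if_false, Nat.min_self, beq_self_eq_true, if_true]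
  rw [content_fold (PySem.Str.lower content)]
  rcases Bool.eq_false_or_eq_true ((["bug", "error", "broken", "doesn't work"] : List String).any
      (fun w => PySem.Str.isIn w (PySem.Str.lower content))) with hc0 | hc0 <;>
    rcases Bool.eq_false_or_eq_true ((["feature", "enhancement", "improve", "add"] : List String).any
        (fun w => PySem.Str.isIn w (PySem.Str.lower content))) with hc1 | hc1 <;>
      rcases Bool.eq_false_or_eq_true ((["pain", "frustrating", "difficult", "problem"] : List String).any
          (fun w => PySem.Str.isIn w (PySem.Str.lower content))) with hc2 | hc2 <;>
        rcases Bool.eq_false_or_eq_true ((["opportunity", "market", "business"] : List String).any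
            (fun w => PySem.Str.isIn w (PySem.Str.lower content))) with hc3 | hc3 <;>
          simp only [hc0, hc1, hc2, hc3] <;> rfl
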